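-- pv_equiv track=rewrite | github.com/Nimdy/NjordScan | njordscan/modules/supply_chain.py | _parse_yarn_lock
-- ===== SOURCE A (Python) =====
-- from typing import List, Dict, Any, Optional
--
-- def _parse_yarn_lock(content: str) -> Dict[str, Dict[str, str]]:
--     """Simple parser for yarn.lock files."""
--     entries: Dict[str, Dict[str, str]] = {}
--     current_entry = None
--     current_data: Dict[str, str] = {}
--
--     for line in content.splitlines():
--         stripped = line.strip()
--
--         # Skip comments and empty lines
--         if not stripped or stripped.startswith('#'):
--             continue
--
--         # Entry header (not indented, ends with colon)
--         if not line.startswith(' ') and not line.startswith('\t') and stripped.endswith(':'):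
--             # Save previous entry
--             if current_entry is not None:
--                 entries[current_entry] = current_data
--             current_entry = stripped.rstrip(':').strip('"')
--             current_data = {}
--         elif current_entry is not None and (line.startswith('  ') or line.startswith('\t')):
--             # Key-value pair inside an entry
--             if ' ' in stripped:
--                 key, _, value = stripped.partition(' ')
--                 current_data[key.strip()] = value.strip().strip('"')
--
--     # Save last entry
--     if current_entry is not None:
--         entries[current_entry] = current_data
--
--     return entries
-- ===== SOURCE B (Python) =====
-- def _parse_yarn_lock(content: str):
--     """Two-phase parser: first group lines under their headers, then build the dicts."""
--     groups = []
--     current = None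
--     for line in content.splitlines():
--         stripped = line.strip()
--         if not stripped or stripped.startswith('#'):
--             continue
--         if not line.startswith(' ') and not line.startswith('\t') and stripped.endswith(':'):
--             if current is not None:
--                 groups.append(current)
--             current = (stripped.rstrip(':').strip('"'), [])
--         elif line.startswith('  ') or line.startswith('\t'):
--             if current is not None:
--                 current[1].append(line)
--     if current is not None:
--         groups.append(current)
--
--     entries = {}
--     for name, body in groups:
--         data = {}
--         for bline in body:
--             stripped = bline.strip()
--             if ' ' in stripped:
--                 key, _, value = stripped.partition(' ')
--                 data[key.strip()] = value.strip().strip('"')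
--         entries[name] = data
--     return entries
-- ===== Notes on version B (the rewrite author's own statement) =====
-- stated objective: alternative
-- what changed: A's single stateful pass (entries dict + current_entry + current_data mutated per line) is re-decomposed into two phases: pass 1 groups the raw body lines under their headers, pass 2 builds each group's key/value dict and assembles the entries dict.
import Mathlib
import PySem

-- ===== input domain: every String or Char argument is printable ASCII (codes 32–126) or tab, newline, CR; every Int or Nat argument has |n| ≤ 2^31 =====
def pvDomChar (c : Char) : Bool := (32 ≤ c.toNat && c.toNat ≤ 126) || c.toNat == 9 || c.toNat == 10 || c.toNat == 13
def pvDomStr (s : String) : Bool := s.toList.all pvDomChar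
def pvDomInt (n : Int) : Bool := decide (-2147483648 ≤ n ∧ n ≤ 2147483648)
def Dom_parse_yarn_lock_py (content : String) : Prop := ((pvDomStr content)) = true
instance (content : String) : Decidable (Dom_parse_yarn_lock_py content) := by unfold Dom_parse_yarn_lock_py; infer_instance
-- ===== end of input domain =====

-- B re-decomposes A's single stateful pass into two phases (group lines under headers, then build
-- each entry's dict); same return value, objective: alternative decomposition, no speed claim.

-- shared primitive helpers (each line of Python both programs contain, ported once)

-- exact port of stripped.rstrip(':').strip('"') (PySem has no rstrip-with-chars: drop trailing ':' by hand)
def pvHeaderName (stripped : String) : String :=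
  PySem.Str.stripChars (String.ofList ((stripped.toList.reverse.dropWhile (fun c => c == ':')).reverse)) "\""

-- exact port of: key, _, value = stripped.partition(' '); (key.strip(), value.strip().strip('"'))
-- partition(' ') at the FIRST space: key = chars before it, value = chars after it (used only when ' ' in stripped)
def pvKV (stripped : String) : String × String :=
  let cs := stripped.toList
  let key := cs.takeWhile (fun c => !(c == ' '))
  let value := (cs.dropWhile (fun c => !(c == ' '))).drop 1
  (String.ofList (PySem.Chars.strip key), String.ofList (PySem.Chars.stripChars (PySem.Chars.strip value) ['"']))

-- ===== PORT A =====
-- A's loop state: (entries, current_entry, current_data); entry values are saved as items lists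
def pvAStep
    (st : PySem.Dict String (List (String × String)) × Option String × PySem.Dict String String)
    (line : String) :
    PySem.Dict String (List (String × String)) × Option String × PySem.Dict String String :=
  let stripped := PySem.Str.strip line
  if stripped = "" || PySem.Str.startswith stripped "#" then st
  else if !PySem.Str.startswith line " " && !PySem.Str.startswith line "\t"
          && PySem.Str.endswith stripped ":" then
    let entries := match st.2.1 with
      | some cur => st.1.insert cur st.2.2.items
      | none => st.1
    (entries, some (pvHeaderName stripped), PySem.Dict.empty)
  else
    match st.2.1 with
    | some cur =>
      if PySem.Str.startswith line "  " || PySem.Str.startswith line "\t" then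
        if PySem.Str.isIn " " stripped then
          let kv := pvKV stripped
          (st.1, some cur, st.2.2.insert kv.1 kv.2)
        else st
      else st
    | none => st

def parse_yarn_lock_py (content : String) : List (String × List (String × String)) :=
  let fin := (PySem.Str.splitlines content).foldl pvAStep (PySem.Dict.empty, none, PySem.Dict.empty)
  (match fin.2.1 with
   | some cur => fin.1.insert cur fin.2.2.items
   | none => fin.1).items

-- ===== PORT B =====
-- phase 1: group lines: state (finished groups, current group = (header, raw body lines))
def pvBStep
    (st : List (String × List String) × Option (String × List String))
    (line : String) :
    List (String × List String) × Option (String × List String) :=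
  let stripped := PySem.Str.strip line
  if stripped = "" || PySem.Str.startswith stripped "#" then st
  else if !PySem.Str.startswith line " " && !PySem.Str.startswith line "\t"
          && PySem.Str.endswith stripped ":" then
    (match st.2 with | some g => st.1 ++ [g] | none => st.1, some (pvHeaderName stripped, []))
  else if PySem.Str.startswith line "  " || PySem.Str.startswith line "\t" then
    match st.2 with
    | some g => (st.1, some (g.1, g.2 ++ [line]))
    | none => st
  else st

-- phase 2: build one group's key/value dict from its raw body lines
def pvGroupData (body : List String) : PySem.Dict String String :=
  body.foldl (fun d bline =>
    let stripped := PySem.Str.strip bline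
    if PySem.Str.isIn " " stripped then
      let kv := pvKV stripped
      d.insert kv.1 kv.2
    else d) PySem.Dict.empty

def parse_yarn_lock_py_alt (content : String) : List (String × List (String × String)) :=
  let st := (PySem.Str.splitlines content).foldl pvBStep ([], none)
  let groups := match st.2 with | some g => st.1 ++ [g] | none => st.1
  (groups.foldl (fun d g => d.insert g.1 (pvGroupData g.2).items) PySem.Dict.empty).items

-- ===== PRECONDITION & SPEC =====
def Spec_parse_yarn_lock_py (content : String) (out : List (String × List (String × String))) : Prop := out = parse_yarn_lock_py_alt content
instance (content : String) (out : List (String × List (String × String))) : Decidable (Spec_parse_yarn_lock_py content out) := by unfold Spec_parse_yarn_lock_py; infer_instance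

-- ===== CLAIM (what is proved, stated in full; the proofs are below) =====
def Claim_equal_parse_yarn_lock_py : Prop := ∀ (content : String), Dom_parse_yarn_lock_py content → Spec_parse_yarn_lock_py content (parse_yarn_lock_py content)

-- ===== LEMMAS AND PROOFS =====

-- the entry-dict one finished group contributes (the fold step of B's final pass)
def pvGStep (d : PySem.Dict String (List (String × String))) (g : String × List String) :
    PySem.Dict String (List (String × String)) :=
  d.insert g.1 (pvGroupData g.2).items

-- abstraction: the A-state a B-state denotes
def pvAbs (st : List (String × List String) × Option (String × List String)) :
    PySem.Dict String (List (String × String)) × Option String × PySem.Dict String String :=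
  (st.1.foldl pvGStep PySem.Dict.empty, st.2.map Prod.fst,
   match st.2 with | some g => pvGroupData g.2 | none => PySem.Dict.empty)

theorem pvStepComm (st : List (String × List String) × Option (String × List String))
    (line : String) : pvAStep (pvAbs st) line = pvAbs (pvBStep st line) := by
  obtain ⟨groups, g⟩ := st
  cases g with
  | none =>
    simp only [pvAStep, pvBStep, pvAbs]
    split_ifs <;> rfl
  | some gr =>
    simp only [pvAStep, pvBStep, pvAbs]
    split_ifs <;>
      simp_all [pvGStep, pvGroupData, List.foldl_append]

theorem pvLoopComm (lines : List String)
    (st : List (String × List String) × Option (String × List String)) :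
    lines.foldl pvAStep (pvAbs st) = pvAbs (lines.foldl pvBStep st) := by
  induction lines generalizing st with
  | nil => rfl
  | cons l t ih => simp only [List.foldl_cons, pvStepComm st l, ih]

-- ===== VERDICT (by name: the statement is the Claim_ definition above) =====
theorem parse_yarn_lock_py_spec : Claim_equal_parse_yarn_lock_py := by
  intro content _
  show parse_yarn_lock_py content = parse_yarn_lock_py_alt content
  unfold parse_yarn_lock_py parse_yarn_lock_py_alt
  have h0 : (PySem.Dict.empty, (none : Option String),
      (PySem.Dict.empty : PySem.Dict String String)) = pvAbs ([], none) := rfl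
  rw [h0, pvLoopComm]
  obtain ⟨groups, g⟩ := (PySem.Str.splitlines content).foldl pvBStep ([], none)
  cases g with
  | none => rfl
  | some gr =>
    show ((groups.foldl pvGStep PySem.Dict.empty).insert gr.1 (pvGroupData gr.2).items).items
      = ((groups ++ [gr]).foldl (fun d g => d.insert g.1 (pvGroupData g.2).items)
          PySem.Dict.empty).items
    rw [List.foldl_append]
    rfl
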